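-- pv_equiv track=rewrite | github.com/blairnangle/notion-to-todoist | execute.py | count_todos
-- ===== SOURCE A (Python) =====
-- from typing import Tuple
--
-- def count_todos(todos: list) -> Tuple[int, int]:
--     undone: int = 0
--     done: int = 0
--     for todo in todos:
--         if todo['done']:
--             done += 1
--         else:
--             undone += 1
--
--     return undone, done
-- ===== SOURCE B (Python) =====
-- from typing import Tuple
--
-- def count_todos(todos: list) -> Tuple[int, int]:
--     def go(lo: int, hi: int) -> Tuple[int, int]:
--         if hi - lo == 0:
--             return 0, 0
--         if hi - lo == 1:
--             return (0, 1) if todos[lo]['done'] else (1, 0)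
--         mid = (lo + hi) // 2
--         u1, d1 = go(lo, mid)
--         u2, d2 = go(mid, hi)
--         return u1 + u2, d1 + d2
--     return go(0, len(todos))
-- ===== Notes on version B (the rewrite author's own statement) =====
-- stated objective: alternative
-- what changed: B counts by divide-and-conquer on index ranges (split at the midpoint, count each half recursively, add the pairs) instead of A's single linear scan with two running counters.
import Mathlib
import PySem

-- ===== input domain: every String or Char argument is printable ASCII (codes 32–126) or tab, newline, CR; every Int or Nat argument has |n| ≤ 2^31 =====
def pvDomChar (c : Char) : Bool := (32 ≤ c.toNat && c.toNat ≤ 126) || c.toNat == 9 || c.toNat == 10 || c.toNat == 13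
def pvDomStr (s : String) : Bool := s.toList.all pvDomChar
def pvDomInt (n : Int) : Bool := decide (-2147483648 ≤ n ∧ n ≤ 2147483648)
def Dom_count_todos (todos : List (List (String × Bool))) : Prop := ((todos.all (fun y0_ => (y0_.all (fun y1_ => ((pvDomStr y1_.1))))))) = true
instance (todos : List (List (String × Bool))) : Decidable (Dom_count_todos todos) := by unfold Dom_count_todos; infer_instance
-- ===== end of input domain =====

-- B counts by divide-and-conquer on index ranges (split at midpoint, add the halves' pairs); A is a single linear scan with two running counters.

-- ===== PORT A =====
-- todo['done'] is first-match association-list lookup; under Pre_ the key is present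
-- (List.lookup is exact for dict lookup on the stated domain).
def count_todos (todos : List (List (String × Bool))) : Int × Int :=
  todos.foldl
    (fun (ud : Int × Int) todo =>
      if (todo.lookup "done").getD false then (ud.1, ud.2 + 1) else (ud.1 + 1, ud.2))
    (0, 0)

-- ===== PORT B =====
-- go(lo, hi) of Source B; todos[lo] is ported as getD lo [] — exact because every call keeps lo < todos.length.
def countGo (todos : List (List (String × Bool))) (lo hi : Nat) : Int × Int :=
  if hi - lo = 0 then (0, 0)
  else if hi - lo = 1 then
    if ((todos.getD lo []).lookup "done").getD false then (0, 1) else (1, 0)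
  else
    let mid := (lo + hi) / 2
    let p1 := countGo todos lo mid
    let p2 := countGo todos mid hi
    (p1.1 + p2.1, p1.2 + p2.2)
termination_by hi - lo
decreasing_by all_goals omega

def count_todos_alt (todos : List (List (String × Bool))) : Int × Int :=
  countGo todos 0 todos.length

-- ===== PRECONDITION & SPEC =====
-- Pre_ excludes todos missing the 'done' key, on which Python A (and B) raises KeyError.
def Pre_count_todos (todos : List (List (String × Bool))) : Prop :=
  ∀ todo ∈ todos, (todo.lookup "done").isSome = true
instance (todos : List (List (String × Bool))) : Decidable (Pre_count_todos todos) := by unfold Pre_count_todos; infer_instance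
def pvWitness_count_todos : (List (List (String × Bool))) := [[("done", true)], [("done", false)]]

def Spec_count_todos (todos : List (List (String × Bool))) (out : Int × Int) : Prop := out = count_todos_alt todos
instance (todos : List (List (String × Bool))) (out : Int × Int) : Decidable (Spec_count_todos todos out) := by unfold Spec_count_todos; infer_instance

-- ===== CLAIM (what is proved, stated in full; the proofs are below) =====
def Claim_equal_count_todos : Prop := ∀ (todos : List (List (String × Bool))), Dom_count_todos todos → Pre_count_todos todos → Spec_count_todos todos (count_todos todos)

-- ===== LEMMAS AND PROOFS =====
def pvDone (t : List (String × Bool)) : Bool := (t.lookup "done").getD false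
def cntD (l : List (List (String × Bool))) : Int := (l.countP pvDone : Int)
def cntU (l : List (List (String × Bool))) : Int := (l.countP (fun t => !pvDone t) : Int)

lemma foldl_counts (l : List (List (String × Bool))) (u d : Int) :
    l.foldl
      (fun (ud : Int × Int) todo =>
        if (todo.lookup "done").getD false then (ud.1, ud.2 + 1) else (ud.1 + 1, ud.2))
      (u, d) = (u + cntU l, d + cntD l) := by
  induction l generalizing u d with
  | nil => simp [cntU, cntD]
  | cons t ts ih =>
    simp only [List.foldl_cons]
    by_cases h : (t.lookup "done").getD false
    · simp only [h, if_true, ih]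
      simp [cntU, cntD, pvDone, h]
      ring
    · simp only [h, ih]
      simp [cntU, cntD, pvDone, h]
      ring

lemma seg_split {α : Type} (l : List α) (lo mid hi : Nat) (h1 : lo ≤ mid) (h2 : mid ≤ hi) :
    (l.drop lo).take (hi - lo) = (l.drop lo).take (mid - lo) ++ (l.drop mid).take (hi - mid) := by
  have h : hi - lo = (mid - lo) + (hi - mid) := by omega
  rw [h, List.take_add, List.drop_drop]
  have h' : lo + (mid - lo) = mid := by omega
  rw [h']

lemma countGo_counts (todos : List (List (String × Bool))) (lo hi : Nat)
    (hhi : hi ≤ todos.length) :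
    countGo todos lo hi
      = (cntU ((todos.drop lo).take (hi - lo)), cntD ((todos.drop lo).take (hi - lo))) := by
  revert hhi
  induction lo, hi using countGo.induct todos with
  | case1 lo hi h0 =>
    intro hhi
    rw [countGo]
    simp [h0, cntU, cntD]
  | case2 lo hi h0 h1 hb =>
    intro hhi
    have hlo : lo < todos.length := by omega
    have hg : todos.getD lo [] = todos[lo] := List.getD_eq_getElem _ _ hlo
    rw [hg] at hb
    rw [countGo, h1, List.take_one_drop_eq_of_lt_length hlo]
    simp [hb, cntU, cntD, pvDone, List.getElem?_eq_getElem hlo]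
  | case3 lo hi h0 h1 hb =>
    intro hhi
    have hlo : lo < todos.length := by omega
    have hg : todos.getD lo [] = todos[lo] := List.getD_eq_getElem _ _ hlo
    rw [hg] at hb
    rw [countGo, h1, List.take_one_drop_eq_of_lt_length hlo]
    simp [hb, cntU, cntD, pvDone, List.getElem?_eq_getElem hlo]
  | case4 lo hi h0 h1 mid ih1 ih2 =>
    intro hhi
    rw [countGo]
    simp only [h0, h1, if_false]
    have hmid : mid = (lo + hi) / 2 := rfl
    have hm1 : lo ≤ mid := by omega
    have hm2 : mid ≤ hi := by omega
    rw [ih1 (by omega), ih2 (by omega)]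
    rw [seg_split todos lo mid hi hm1 hm2]
    simp [cntU, cntD, List.countP_append]

-- ===== VERDICT (by name: the statement is the Claim_ definition above) =====
theorem count_todos_spec : Claim_equal_count_todos := by
  intro todos _ _
  unfold Spec_count_todos count_todos count_todos_alt
  rw [foldl_counts, countGo_counts todos 0 todos.length (le_refl _)]
  simp
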